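-- pv_equiv track=rewrite | github.com/JPA-Jack/bookbot | stats.py | count_ch
-- ===== SOURCE A (Python) =====
-- def count_ch (words):
--     ch_dict = {}
--     word_list = words.split()
--     temp = 0
--     for word in word_list:
--         word = word.lower()
--         for ch in word:
--             if ch in ch_dict:
--                 temp = ch_dict[ch]
--                 ch_dict[ch] = temp + 1
--             else:
--                 ch_dict[ch] = 1
--     return ch_dict
-- ===== SOURCE B (Python) =====
-- def count_ch(words):
--     chars = "".join(words.split()).lower()
--     result = {}
--     for ch in chars:
--         if ch not in result:
--             result[ch] = chars.count(ch)
--     return result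
-- ===== Notes on version B (the rewrite author's own statement) =====
-- stated objective: faster
-- what changed: B first strips whitespace by joining the split words into one lowered string, then builds the dict in a distinct-keys pass that calls str.count once per first occurrence, instead of A's per-character get-then-increment dict updates.
import Mathlib
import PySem

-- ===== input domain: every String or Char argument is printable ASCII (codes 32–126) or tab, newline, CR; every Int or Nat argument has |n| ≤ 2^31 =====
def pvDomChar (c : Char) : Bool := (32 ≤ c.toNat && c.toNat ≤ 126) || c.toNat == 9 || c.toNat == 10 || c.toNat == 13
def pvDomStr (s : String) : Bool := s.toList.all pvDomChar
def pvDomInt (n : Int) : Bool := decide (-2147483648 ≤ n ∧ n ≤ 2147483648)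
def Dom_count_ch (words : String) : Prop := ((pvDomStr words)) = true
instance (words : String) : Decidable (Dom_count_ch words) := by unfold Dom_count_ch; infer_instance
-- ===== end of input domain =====

-- B strips whitespace first, then counts each distinct character once with str.count
-- instead of A's per-character dict increments; same return value, different decomposition.

-- ===== PORT A =====
def count_ch (words : String) : List (String × Int) :=
  let word_list := PySem.Str.split₀ words
  (word_list.foldl (fun d word =>
      let w := PySem.Str.lower word
      w.toList.foldl (fun d ch =>
        match d.get? (String.ofList [ch]) with
        | some temp => d.insert (String.ofList [ch]) (temp + 1)
        | none => d.insert (String.ofList [ch]) 1) d)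
    PySem.Dict.empty).items

-- ===== PORT B =====
def count_ch_alt (words : String) : List (String × Int) :=
  let chars := PySem.Str.lower (PySem.Str.join "" (PySem.Str.split₀ words))
  (chars.toList.foldl (fun d ch =>
      if d.contains (String.ofList [ch]) then d
      else d.insert (String.ofList [ch]) ((PySem.Str.count chars (String.ofList [ch]) : Int)))
    PySem.Dict.empty).items

-- ===== PRECONDITION & SPEC =====
def Spec_count_ch (words : String) (out : List (String × Int)) : Prop := out = count_ch_alt words
instance (words : String) (out : List (String × Int)) : Decidable (Spec_count_ch words out) := by unfold Spec_count_ch; infer_instance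

-- ===== CLAIM (what is proved, stated in full; the proofs are below) =====
def Claim_equal_count_ch : Prop := ∀ (words : String), Dom_count_ch words → Spec_count_ch words (count_ch words)

-- ===== LEMMAS AND PROOFS =====

theorem intercalate_nil_left (l : List (List Char)) : [].intercalate l = l.flatten := by
  induction l with
  | nil => rfl
  | cons x t ih =>
    cases t with
    | nil => simp [List.intercalate]
    | cons y t' =>
      simp only [List.intercalate, List.intersperse] at *
      simp_all

theorem count_go_singleton (c : Char) :
    ∀ (l : List Char) (fuel acc : Nat), l.length ≤ fuel →
      PySem.Chars.count.go [c] fuel l acc = acc + l.count c := by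
  intro l
  induction l with
  | nil => intro fuel acc h; cases fuel <;> simp [PySem.Chars.count.go]
  | cons x t ih =>
    intro fuel acc h
    cases fuel with
    | zero => simp at h
    | succ f =>
      have hf : t.length ≤ f := by simp at h; omega
      by_cases hx : x = c
      · subst hx
        simp only [PySem.Chars.count.go, List.isPrefixOf, BEq.rfl, Bool.true_and, if_pos]
        rw [show List.drop ([x].length) (x :: t) = t by simp]
        rw [ih f (acc + 1) hf]
        simp
        omega
      · have hb : ([c].isPrefixOf (x :: t)) = false := by
          simp [List.isPrefixOf]
          exact fun hh => absurd hh (Ne.symm hx)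
        simp only [PySem.Chars.count.go, hb, Bool.false_eq_true, if_false]
        rw [ih f acc hf]
        simp [hx]

theorem chars_count_singleton (l : List Char) (c : Char) :
    PySem.Chars.count l [c] = l.count c := by
  simp [PySem.Chars.count, count_go_singleton c l l.length 0 le_rfl]

theorem prefix_set_update (s : List String) (xs : List String) :
    s <+: PySem.Set.update s xs := by
  induction xs generalizing s with
  | nil => simp [PySem.Set.update]
  | cons x t ih =>
    have h1 : s <+: PySem.Set.add s x := by
      simp only [PySem.Set.add]; split <;> simp
    exact h1.trans (ih (PySem.Set.add s x))

theorem update_cons (s : List String) (x : String) (t : List String) :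
    PySem.Set.update s (x :: t) = PySem.Set.update (PySem.Set.add s x) t := rfl

theorem foldB_items (C : String → Int) :
    ∀ (ks : List String) (d : PySem.Dict String Int), d.keys.Nodup →
      (ks.foldl (fun d k => if d.contains k then d else d.insert k (C k)) d).items
        = d.items ++ ((PySem.Set.update d.keys ks).drop d.keys.length).map (fun k => (k, C k)) := by
  intro ks
  induction ks with
  | nil => intro d hd; simp [PySem.Set.update]
  | cons k t ih =>
    intro d hd
    simp only [List.foldl_cons, update_cons]
    by_cases hc : d.contains k = true
    · have hmem : k ∈ d.keys := (PySem.Dict.contains_iff_mem_keys d k).mp hc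
      have hadd : PySem.Set.add d.keys k = d.keys := by
        simp [PySem.Set.add, hmem]
      rw [hc]; simp only [if_true]
      rw [ih d hd, hadd]
    · have hc' : d.contains k = false := by simpa using hc
      rw [hc']; simp only [Bool.false_eq_true, if_false]
      have hk : (d.insert k (C k)).keys = d.keys ++ [k] :=
        PySem.Dict.keys_insert_of_not_contains d (C k) hc'
      have hnd : (d.insert k (C k)).keys.Nodup := PySem.Dict.nodup_keys_insert d k (C k) hd
      have hmem : k ∉ d.keys := fun hm => by
        simp [(PySem.Dict.contains_iff_mem_keys d k).mpr hm] at hc'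
      have hadd : PySem.Set.add d.keys k = d.keys ++ [k] := by
        simp [PySem.Set.add, hmem]
      rw [ih _ hnd, PySem.Dict.items_insert_of_not_contains d (C k) hc', hk, hadd]
      obtain ⟨rest, hrest⟩ := prefix_set_update (d.keys ++ [k]) t
      rw [← hrest]
      rw [List.drop_left, List.append_assoc d.keys [k] rest, List.drop_left]
      simp

theorem count_ch_key_eq :
    ∀ (d : PySem.Dict String Int) (ch : Char),
      (match d.get? (String.ofList [ch]) with
        | some temp => d.insert (String.ofList [ch]) (temp + 1)
        | none => d.insert (String.ofList [ch]) 1)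
      = d.insert (String.ofList [ch]) (d.getD (String.ofList [ch]) 0 + 1) := by
  intro d ch
  rcases hg : d.get? (String.ofList [ch]) with _ | t
  · simp [PySem.Dict.getD_of_get?_eq_none d 0 hg]
  · simp [PySem.Dict.getD_of_get?_eq_some d 0 hg]

theorem toList_chars (words : String) :
    (PySem.Str.lower (PySem.Str.join "" (PySem.Str.split₀ words))).toList
      = (PySem.Str.split₀ words).flatMap (fun w => PySem.Chars.lower w.toList) := by
  rw [PySem.Str.toList_lower]
  have hj : (PySem.Str.join "" (PySem.Str.split₀ words)).toList
      = ((PySem.Str.split₀ words).map String.toList).flatten := by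
    simp [pysem, PySem.Chars.join, intercalate_nil_left]
  rw [hj]
  simp only [PySem.Chars.lower, List.map_flatten, List.map_map, List.flatMap_def]
  rfl

-- ===== VERDICT (by name: the statement is the Claim_ definition above) =====
theorem count_ch_spec : Claim_equal_count_ch := by
  intro words _
  unfold Spec_count_ch count_ch count_ch_alt
  simp only [PySem.Str.toList_lower]
  set sp := PySem.Str.split₀ words with hsp
  set l : List Char := sp.flatMap (fun w => PySem.Chars.lower w.toList) with hl
  set ks : List String := l.map (fun c => String.ofList [c]) with hks
  -- A side
  have hA : (sp.foldl (fun d word =>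
      (PySem.Chars.lower word.toList).foldl (fun d ch =>
        match d.get? (String.ofList [ch]) with
        | some temp => d.insert (String.ofList [ch]) (temp + 1)
        | none => d.insert (String.ofList [ch]) 1) d)
      (PySem.Dict.empty : PySem.Dict String Int)).items
      = (PySem.Set.ofList ks).map (fun k => (k, (ks.count k : Int))) := by
    rw [← List.foldl_flatMap, ← hl]
    have hstep : (l.foldl (fun d ch =>
        match d.get? (String.ofList [ch]) with
        | some temp => d.insert (String.ofList [ch]) (temp + 1)
        | none => d.insert (String.ofList [ch]) 1) (PySem.Dict.empty : PySem.Dict String Int))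
        = l.foldl (fun d ch => d.insert (String.ofList [ch])
            (d.getD (String.ofList [ch]) 0 + 1)) (PySem.Dict.empty : PySem.Dict String Int) := by
      exact PySem.List.foldl_congr_mem _ _ _ _ (fun d ch _ => count_ch_key_eq d ch)
    rw [hstep, ← List.foldl_map (f := fun c => String.ofList [c])
        (g := fun (d : PySem.Dict String Int) k => d.insert k (d.getD k 0 + 1)), ← hks,
      PySem.Dict.foldl_insert_getD_add_one_eq_counter, PySem.Dict.items_counter]
  -- B side
  have hchars : (PySem.Str.lower (PySem.Str.join "" sp)).toList = l := toList_chars words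
  have hchars' : PySem.Chars.lower (PySem.Str.join "" sp).toList = l := by
    rw [← PySem.Str.toList_lower]; exact hchars
  have hB : ((PySem.Chars.lower (PySem.Str.join "" sp).toList).foldl (fun d ch =>
      if d.contains (String.ofList [ch]) then d
      else d.insert (String.ofList [ch])
        ((PySem.Str.count (PySem.Str.lower (PySem.Str.join "" sp)) (String.ofList [ch]) : Nat) : Int))
      PySem.Dict.empty).items
      = (PySem.Set.ofList ks).map (fun k => (k,
          ((PySem.Str.count (PySem.Str.lower (PySem.Str.join "" sp)) k : Nat) : Int))) := by
    rw [hchars', ← List.foldl_map (f := fun c => String.ofList [c])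
        (g := fun (d : PySem.Dict String Int) k => if d.contains k then d
          else d.insert k ((PySem.Str.count (PySem.Str.lower (PySem.Str.join "" sp)) k : Nat) : Int)), ← hks]
    rw [foldB_items (fun k => ((PySem.Str.count (PySem.Str.lower (PySem.Str.join "" sp)) k : Nat) : Int))
      ks PySem.Dict.empty (by simp)]
    simp [PySem.Set.update_nil_left, PySem.Dict.empty]
  rw [hA, hB]
  apply List.map_congr_left
  intro k hk
  have hk' : k ∈ ks := (PySem.Set.mem_ofList ks k).mp hk
  rw [hks] at hk'
  obtain ⟨c, hc, rfl⟩ := List.mem_map.mp hk'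
  have hinj : Function.Injective (fun c : Char => String.ofList [c]) :=
    fun a b h => by simpa using congrArg String.toList h
  have hcm : List.count (String.ofList [c]) (l.map (fun c => String.ofList [c])) = l.count c :=
    List.count_map_of_injective l _ hinj c
  have hcount : PySem.Str.count (PySem.Str.lower (PySem.Str.join "" sp)) (String.ofList [c])
      = l.count c := by
    have hb : PySem.Str.count (PySem.Str.lower (PySem.Str.join "" sp)) (String.ofList [c])
        = PySem.Chars.count (PySem.Str.lower (PySem.Str.join "" sp)).toList [c] := by
      simp [pysem]
    rw [hb, hchars, chars_count_singleton]
  rw [hcount, hks, hcm]
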